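-- pv_equiv track=rewrite | github.com/EAexist/subscription-killer-api-benchmark | scripts/trace_parser.py | _check_concurrency
-- ===== SOURCE A (Python) =====
-- from typing import List, Dict, Any, Optional
--
-- def _check_concurrency(spans: List[Dict[str, Any]]) -> bool:
--     """Check if spans are concurrent using timestamps."""
--     if len(spans) <= 1:
--         return False
--
--     sorted_spans = sorted(spans, key=lambda x: x['timestamp'])
--
--     for i in range(len(sorted_spans) - 1):
--         current_end = sorted_spans[i]['timestamp'] + sorted_spans[i]['duration_ms']
--         next_start = sorted_spans[i + 1]['timestamp']
--         if next_start < current_end: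
--             return True
--
--     return False
-- ===== SOURCE B (Python) =====
-- def _check_concurrency(spans):
--     """Check if spans are concurrent using timestamps."""
--     if len(spans) <= 1:
--         return False
--
--     seen = []
--     for span in spans:
--         s = span['timestamp']
--         e = s + span['duration_ms']
--         for ps, pe in seen:
--             if (ps <= s < pe) or (s < ps < e):
--                 return True
--         seen.append((s, e))
--     return False
-- ===== Notes on version B (the rewrite author's own statement) =====
-- stated objective: alternative
-- what changed: Replaces A's sort-then-adjacent-pair scan by a sort-free single pass that compares each span's (start, end) against all earlier spans' accumulated (start, end) pairs, testing whether either start lies strictly inside the other interval (ties on start resolved toward the earlier-listed span).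
-- outside the precondition, e.g. on _check_concurrency([{'timestamp': 0, 'duration_ms': 5}, {'timestamp': 10}]): A returns False, B raises KeyError
import Mathlib
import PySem

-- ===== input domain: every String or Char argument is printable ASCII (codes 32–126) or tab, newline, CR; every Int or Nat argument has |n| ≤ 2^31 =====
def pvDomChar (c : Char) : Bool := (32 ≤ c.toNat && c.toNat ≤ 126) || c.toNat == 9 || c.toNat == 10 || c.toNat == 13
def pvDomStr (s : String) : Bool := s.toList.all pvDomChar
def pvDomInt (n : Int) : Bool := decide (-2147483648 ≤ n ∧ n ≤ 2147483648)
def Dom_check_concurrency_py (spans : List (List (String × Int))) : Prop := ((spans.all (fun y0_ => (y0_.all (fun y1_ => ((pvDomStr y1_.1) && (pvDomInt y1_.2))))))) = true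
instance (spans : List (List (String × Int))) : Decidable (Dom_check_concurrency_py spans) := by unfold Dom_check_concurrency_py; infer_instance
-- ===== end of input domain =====

-- B replaces A's sort-then-adjacent-pair scan by a sort-free quadratic pass comparing each span
-- against all earlier spans (objective: alternative algorithm of similar cost; equal return values).

-- ===== PORT A =====
-- sp['timestamp'] / sp['duration_ms'] as PySem.Dict lookup (first match; exact since Pre_ requires the key present)
def pvTs (sp : List (String × Int)) : Int := PySem.Dict.getD ⟨sp⟩ "timestamp" 0
def pvDur (sp : List (String × Int)) : Int := PySem.Dict.getD ⟨sp⟩ "duration_ms" 0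

-- A's loop `for i in range(len(sorted_spans)-1): if next_start < current_end: return True` as adjacent-pair recursion
def pvAdjScan : List (List (String × Int)) → Bool
  | a :: b :: rest => if pvTs b < pvTs a + pvDur a then true else pvAdjScan (b :: rest)
  | _ => false

def check_concurrency_py (spans : List (List (String × Int))) : Bool :=
  if spans.length ≤ 1 then false
  else pvAdjScan (PySem.List.sorted spans pvTs false)

-- ===== PORT B =====
-- Source B's inner loop over `seen` (pairs (s, e) of the earlier spans) and outer loop over spans
def pvPairLoop (seen : List (Int × Int)) : List (List (String × Int)) → Bool
  | [] => false
  | sp :: rest =>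
    let s := pvTs sp
    let e := s + pvDur sp
    if seen.any (fun p => (decide (p.1 ≤ s) && decide (s < p.2)) || (decide (s < p.1) && decide (p.1 < e))) then true
    else pvPairLoop (seen ++ [(s, e)]) rest

def check_concurrency_py_alt (spans : List (List (String × Int))) : Bool :=
  if spans.length ≤ 1 then false
  else pvPairLoop [] spans

-- ===== PRECONDITION & SPEC =====
-- Pre_ excludes spans lists (beyond the length-≤-1 early return) in which some span is missing the
-- 'timestamp' or 'duration_ms' key: Python A raises KeyError on almost all of them (the sort key or the
-- loop reads the key), and B naturally raises KeyError on the remaining few where A happens to return.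
def Pre_check_concurrency_py (spans : List (List (String × Int))) : Prop :=
  spans.length ≤ 1 ∨ ∀ sp ∈ spans, ("timestamp" ∈ sp.map Prod.fst ∧ "duration_ms" ∈ sp.map Prod.fst)
instance (spans : List (List (String × Int))) : Decidable (Pre_check_concurrency_py spans) := by
  unfold Pre_check_concurrency_py; infer_instance

def pvWitness_check_concurrency_py : (List (List (String × Int))) :=
  [[("timestamp", 0), ("duration_ms", 5)], [("timestamp", 3), ("duration_ms", 1)]]

def Spec_check_concurrency_py (spans : List (List (String × Int))) (out : Bool) : Prop := out = check_concurrency_py_alt spans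
instance (spans : List (List (String × Int))) (out : Bool) : Decidable (Spec_check_concurrency_py spans out) := by unfold Spec_check_concurrency_py; infer_instance

-- ===== CLAIM (what is proved, stated in full; the proofs are below) =====
def Claim_equal_check_concurrency_py : Prop := ∀ (spans : List (List (String × Int))), Dom_check_concurrency_py spans → Pre_check_concurrency_py spans → Spec_check_concurrency_py spans (check_concurrency_py spans)

-- ===== LEMMAS AND PROOFS =====

-- b starts strictly inside a's half-open interval (given a starts no later): the overlap test
def pvOv (a b : List (String × Int)) : Prop := pvTs b < pvTs a + pvDur a
-- symmetric pair condition for a pair (a earlier in the list, b later)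
def pvR (a b : List (String × Int)) : Prop :=
  (pvTs a ≤ pvTs b ∧ pvOv a b) ∨ (pvTs b < pvTs a ∧ pvOv b a)
-- "some in-order pair of l satisfies pvOv"
def pvP (l : List (List (String × Int))) : Prop := ∃ a b, [a, b].Sublist l ∧ pvOv a b
-- "some in-order pair of l satisfies pvR"
def pvSub (l : List (List (String × Int))) : Prop := ∃ a b, [a, b].Sublist l ∧ pvR a b

theorem pv_pair_sublist_cons {α : Type} (x y a : α) (l : List α) :
    [x, y].Sublist (a :: l) ↔ [x, y].Sublist l ∨ (x = a ∧ y ∈ l) := by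
  rw [List.sublist_cons_iff]
  constructor
  · rintro (h | ⟨r, hr, hsub⟩)
    · exact Or.inl h
    · cases hr
      exact Or.inr ⟨rfl, List.singleton_sublist.mp hsub⟩
  · rintro (h | ⟨rfl, hy⟩)
    · exact Or.inl h
    · exact Or.inr ⟨[y], rfl, List.singleton_sublist.mpr hy⟩

theorem pvP_nil : ¬ pvP [] := by
  rintro ⟨a, b, hs, -⟩
  have := hs.length_le
  simp at this

theorem pvP_single (a : List (String × Int)) : ¬ pvP [a] := by
  rintro ⟨x, y, hs, -⟩
  have := hs.length_le
  simp at this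

theorem pvSub_nil : ¬ pvSub [] := by
  rintro ⟨a, b, hs, -⟩
  have := hs.length_le
  simp at this

theorem pvP_cons (a : List (String × Int)) (l : List (List (String × Int))) :
    pvP (a :: l) ↔ (∃ c ∈ l, pvOv a c) ∨ pvP l := by
  unfold pvP
  constructor
  · rintro ⟨x, y, hs, hov⟩
    rcases (pv_pair_sublist_cons x y a l).mp hs with h | ⟨rfl, hy⟩
    · exact Or.inr ⟨x, y, h, hov⟩
    · exact Or.inl ⟨y, hy, hov⟩
  · rintro (⟨c, hc, hov⟩ | ⟨x, y, hs, hov⟩)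
    · exact ⟨a, c, (pv_pair_sublist_cons a c a l).mpr (Or.inr ⟨rfl, hc⟩), hov⟩
    · exact ⟨x, y, (pv_pair_sublist_cons x y a l).mpr (Or.inl hs), hov⟩

theorem pvSub_cons (a : List (String × Int)) (l : List (List (String × Int))) :
    pvSub (a :: l) ↔ (∃ c ∈ l, pvR a c) ∨ pvSub l := by
  unfold pvSub
  constructor
  · rintro ⟨x, y, hs, hov⟩
    rcases (pv_pair_sublist_cons x y a l).mp hs with h | ⟨rfl, hy⟩
    · exact Or.inr ⟨x, y, h, hov⟩
    · exact Or.inl ⟨y, hy, hov⟩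
  · rintro (⟨c, hc, hov⟩ | ⟨x, y, hs, hov⟩)
    · exact ⟨a, c, (pv_pair_sublist_cons a c a l).mpr (Or.inr ⟨rfl, hc⟩), hov⟩
    · exact ⟨x, y, (pv_pair_sublist_cons x y a l).mpr (Or.inl hs), hov⟩

-- A's adjacent scan on a key-sorted list detects exactly pvP
theorem pvAdjScan_iff (l : List (List (String × Int)))
    (hp : l.Pairwise (fun a b => pvTs a ≤ pvTs b)) : pvAdjScan l = true ↔ pvP l := by
  induction l with
  | nil => simp [pvAdjScan, pvP_nil]
  | cons a t ih =>
    cases t with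
    | nil => simp [pvAdjScan, pvP_single]
    | cons b t2 =>
      have hab : pvTs a ≤ pvTs b := (List.pairwise_cons.mp hp).1 b (by simp)
      have hbt : ∀ c ∈ t2, pvTs b ≤ pvTs c := fun c hc =>
        (List.pairwise_cons.mp (List.pairwise_cons.mp hp).2).1 c hc
      have htail := ih (List.pairwise_cons.mp hp).2
      rw [pvP_cons]
      unfold pvAdjScan
      by_cases hov : pvTs b < pvTs a + pvDur a
      · rw [if_pos hov]
        exact iff_of_true rfl (Or.inl ⟨b, by simp, hov⟩)
      · have hnone : ¬ ∃ c ∈ b :: t2, pvOv a c := by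
          rintro ⟨c, hc, hcv⟩
          rcases List.mem_cons.mp hc with rfl | hc2
          · exact hov hcv
          · exact hov (lt_of_le_of_lt (hbt c hc2) hcv)
        rw [if_neg hov, htail]
        constructor
        · exact Or.inr
        · rintro (h | h)
          · exact absurd h hnone
          · exact h

theorem pvInsertBy_pairwise (x : List (String × Int)) (acc : List (List (String × Int)))
    (hp : acc.Pairwise (fun a b => pvTs a ≤ pvTs b)) :
    (PySem.List.insertBy (fun a b => decide (pvTs a < pvTs b)) x acc).Pairwise
      (fun a b => pvTs a ≤ pvTs b) := by
  induction acc with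
  | nil => simp [PySem.List.insertBy]
  | cons h t ih =>
    rcases List.pairwise_cons.mp hp with ⟨hhd, htl⟩
    by_cases hb : pvTs x < pvTs h
    · simp only [PySem.List.insertBy, hb, decide_true, if_true]
      refine List.pairwise_cons.mpr ⟨?_, hp⟩
      intro y hy
      rcases List.mem_cons.mp hy with rfl | hy2
      · exact le_of_lt hb
      · exact le_trans (le_of_lt hb) (hhd y hy2)
    · simp only [PySem.List.insertBy, hb, decide_false, Bool.false_eq_true, if_false]
      refine List.pairwise_cons.mpr ⟨?_, ih htl⟩
      intro y hy
      rcases (PySem.List.mem_insertBy _ x y t).mp hy with rfl | hy2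
      · exact le_of_not_gt hb
      · exact hhd y hy2

theorem pvInsert_P (x : List (String × Int)) (acc : List (List (String × Int)))
    (hp : acc.Pairwise (fun a b => pvTs a ≤ pvTs b)) :
    pvP (PySem.List.insertBy (fun a b => decide (pvTs a < pvTs b)) x acc) ↔
      pvP acc ∨ ∃ p ∈ acc, pvR p x := by
  induction acc with
  | nil =>
    have hins : PySem.List.insertBy (fun a b => decide (pvTs a < pvTs b)) x [] = [x] := by
      simp [PySem.List.insertBy]
    rw [hins]
    simp [pvP_single, pvP_nil]
  | cons hd t ih =>
    rcases List.pairwise_cons.mp hp with ⟨hhd, htl⟩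
    by_cases hb : pvTs x < pvTs hd
    · have hins : PySem.List.insertBy (fun a b => decide (pvTs a < pvTs b)) x (hd :: t) = x :: hd :: t := by
        simp [PySem.List.insertBy, hb]
      rw [hins, pvP_cons]
      constructor
      · rintro (⟨c, hc, hov⟩ | hrest)
        · have hxc : pvTs x < pvTs c := by
            rcases List.mem_cons.mp hc with rfl | hc2
            · exact hb
            · exact lt_of_lt_of_le hb (hhd c hc2)
          exact Or.inr ⟨c, hc, Or.inr ⟨hxc, hov⟩⟩
        · exact Or.inl hrest
      · rintro (hrest | ⟨p, hpmem, hr⟩)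
        · exact Or.inr hrest
        · have hxp : pvTs x < pvTs p := by
            rcases List.mem_cons.mp hpmem with rfl | hp2
            · exact hb
            · exact lt_of_lt_of_le hb (hhd p hp2)
          rcases hr with ⟨hle, -⟩ | ⟨-, hov⟩
          · exact absurd hle (not_le.mpr hxp)
          · exact Or.inl ⟨p, hpmem, hov⟩
    · have hins : PySem.List.insertBy (fun a b => decide (pvTs a < pvTs b)) x (hd :: t) =
          hd :: PySem.List.insertBy (fun a b => decide (pvTs a < pvTs b)) x t := by
        simp [PySem.List.insertBy, hb]
      have hhx : pvTs hd ≤ pvTs x := le_of_not_gt hb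
      rw [hins, pvP_cons, ih htl, pvP_cons]
      constructor
      · rintro (⟨c, hc, hov⟩ | hpt | ⟨p, hp2, hr⟩)
        · rcases (PySem.List.mem_insertBy _ x c t).mp hc with rfl | hc2
          · exact Or.inr ⟨hd, by simp, Or.inl ⟨hhx, hov⟩⟩
          · exact Or.inl (Or.inl ⟨c, hc2, hov⟩)
        · exact Or.inl (Or.inr hpt)
        · exact Or.inr ⟨p, by simp [hp2], hr⟩
      · rintro ((⟨c, hcm, hov⟩ | hpt) | ⟨p, hpmem, hr⟩)
        · exact Or.inl ⟨c, (PySem.List.mem_insertBy _ x c t).mpr (Or.inr hcm), hov⟩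
        · exact Or.inr (Or.inl hpt)
        · rcases List.mem_cons.mp hpmem with rfl | hp2
          · rcases hr with ⟨-, hov⟩ | ⟨hlt, -⟩
            · exact Or.inl ⟨x, (PySem.List.mem_insertBy _ x x t).mpr (Or.inl rfl), hov⟩
            · exact absurd hlt (not_lt.mpr hhx)
          · exact Or.inr (Or.inr ⟨p, hp2, hr⟩)

theorem pvFoldl_P (xs : List (List (String × Int))) (acc : List (List (String × Int)))
    (hp : acc.Pairwise (fun a b => pvTs a ≤ pvTs b)) :
    pvP (xs.foldl (fun acc x => PySem.List.insertBy (fun a b => decide (pvTs a < pvTs b)) x acc) acc) ↔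
      pvP acc ∨ pvSub xs ∨ ∃ p ∈ acc, ∃ x ∈ xs, pvR p x := by
  induction xs generalizing acc with
  | nil =>
    simp only [List.foldl_nil]
    constructor
    · exact fun h => Or.inl h
    · rintro (h | h | ⟨p, hpm, y, hym, hr⟩)
      · exact h
      · exact absurd h pvSub_nil
      · simp at hym
  | cons x t ih =>
    simp only [List.foldl_cons]
    rw [ih _ (pvInsertBy_pairwise x acc hp), pvInsert_P x acc hp, pvSub_cons]
    constructor
    · rintro ((hacc | ⟨p, hpm, hr⟩) | hsub | ⟨p, hpm, y, hym, hr⟩)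
      · exact Or.inl hacc
      · exact Or.inr (Or.inr ⟨p, hpm, x, by simp, hr⟩)
      · exact Or.inr (Or.inl (Or.inr hsub))
      · rcases (PySem.List.mem_insertBy _ x p acc).mp hpm with rfl | hp2
        · exact Or.inr (Or.inl (Or.inl ⟨y, hym, hr⟩))
        · exact Or.inr (Or.inr ⟨p, hp2, y, by simp [hym], hr⟩)
    · rintro (hacc | (⟨c, hcm, hr⟩ | hsub) | ⟨p, hpm, y, hym, hr⟩)
      · exact Or.inl (Or.inl hacc)
      · exact Or.inr (Or.inr ⟨x, (PySem.List.mem_insertBy _ x x acc).mpr (Or.inl rfl), c, hcm, hr⟩)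
      · exact Or.inr (Or.inl hsub)
      · rcases List.mem_cons.mp hym with rfl | hy2
        · exact Or.inl (Or.inr ⟨p, hpm, hr⟩)
        · exact Or.inr (Or.inr ⟨p, (PySem.List.mem_insertBy _ x p acc).mpr (Or.inr hpm), y, hy2, hr⟩)

-- B's loop characterization, generalized over the accumulated (start, end) pairs
theorem pvPairLoop_iff (l : List (List (String × Int))) (seen : List (Int × Int)) :
    pvPairLoop seen l = true ↔
      (∃ x ∈ l, ∃ p ∈ seen, ((p.1 ≤ pvTs x ∧ pvTs x < p.2) ∨ (pvTs x < p.1 ∧ p.1 < pvTs x + pvDur x))) ∨ pvSub l := by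
  induction l generalizing seen with
  | nil =>
    simp only [pvPairLoop]
    constructor
    · intro h
      simp at h
    · rintro (⟨x, hx, -⟩ | h)
      · simp at hx
      · exact absurd h pvSub_nil
  | cons sp rest ih =>
    simp only [pvPairLoop]
    rw [pvSub_cons]
    by_cases hany : ∃ p ∈ seen, ((p.1 ≤ pvTs sp ∧ pvTs sp < p.2) ∨ (pvTs sp < p.1 ∧ p.1 < pvTs sp + pvDur sp))
    · have hcond : (seen.any (fun p => (decide (p.1 ≤ pvTs sp) && decide (pvTs sp < p.2)) || (decide (pvTs sp < p.1) && decide (p.1 < pvTs sp + pvDur sp)))) = true := by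
        rcases hany with ⟨p, hpm, hc⟩
        refine List.any_eq_true.mpr ⟨p, hpm, ?_⟩
        simp only [Bool.or_eq_true, Bool.and_eq_true, decide_eq_true_iff]
        exact hc
      rw [if_pos hcond]
      rcases hany with ⟨p, hpm, hc⟩
      exact iff_of_true rfl (Or.inl ⟨sp, by simp, p, hpm, hc⟩)
    · have hcond : ¬ ((seen.any (fun p => (decide (p.1 ≤ pvTs sp) && decide (pvTs sp < p.2)) || (decide (pvTs sp < p.1) && decide (p.1 < pvTs sp + pvDur sp)))) = true) := by
        intro h
        rcases List.any_eq_true.mp h with ⟨p, hpm, hc⟩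
        simp only [Bool.or_eq_true, Bool.and_eq_true, decide_eq_true_iff] at hc
        exact hany ⟨p, hpm, hc⟩
      rw [if_neg hcond, ih]
      constructor
      · rintro (⟨x, hxm, p, hpm, hc⟩ | hsub)
        · rcases List.mem_append.mp hpm with hp1 | hp2
          · exact Or.inl ⟨x, by simp [hxm], p, hp1, hc⟩
          · have hpx : p = (pvTs sp, pvTs sp + pvDur sp) := by simpa using hp2
            subst hpx
            exact Or.inr (Or.inl ⟨x, hxm, hc⟩)
        · exact Or.inr (Or.inr hsub)
      · rintro (⟨x, hxm, p, hpm, hc⟩ | ⟨c, hcm, hr⟩ | hsub)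
        · rcases List.mem_cons.mp hxm with rfl | hx2
          · exact absurd ⟨p, hpm, hc⟩ hany
          · exact Or.inl ⟨x, hx2, p, List.mem_append.mpr (Or.inl hpm), hc⟩
        · exact Or.inl ⟨c, hcm, (pvTs sp, pvTs sp + pvDur sp), by simp, hr⟩
        · exact Or.inr hsub

theorem pv_main (spans : List (List (String × Int))) :
    check_concurrency_py spans = check_concurrency_py_alt spans := by
  unfold check_concurrency_py check_concurrency_py_alt
  by_cases hlen : spans.length ≤ 1
  · rw [if_pos hlen, if_pos hlen]
  · rw [if_neg hlen, if_neg hlen, Bool.eq_iff_iff]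
    rw [pvAdjScan_iff _ (PySem.List.sorted_pairwise spans pvTs)]
    rw [PySem.List.sorted_eq_foldl_insertBy]
    rw [pvFoldl_P spans [] List.Pairwise.nil]
    rw [pvPairLoop_iff spans []]
    simp [pvP_nil]

-- ===== VERDICT (by name: the statement is the Claim_ definition above) =====
theorem check_concurrency_py_spec : Claim_equal_check_concurrency_py := by
  intro spans _ _
  unfold Spec_check_concurrency_py
  exact pv_main spans
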